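-- pv_equiv track=rewrite | github.com/ebonian/compprog | examples/grader/P/P2/Odd-Odd-Functions.py | zip_odds
-- ===== SOURCE A (Python) =====
-- def is_odd(n):
--     return n%2==1
--
-- def get_odds(x):
--     ans=[]
--     for e in x:
--         if is_odd(e): ans.append(e)
--     return ans
--
-- def zip_odds(a,b):
--     a1=get_odds(a)
--     b1=get_odds(b)
--     n1=len(a1)
--     n2=len(b1)
--     new=[]
--     for i in range(min(n1,n2)):
--         new.append(a1[i])
--         new.append(b1[i])
--     if n1>n2:
--         new+=a1[n2:]
--     elif n1<n2:
--         new+=b1[n1:]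
--     return new
-- ===== SOURCE B (Python) =====
-- def zip_odds(a, b):
--     # Filter odds, then interleave by a role-swapping two-pointer loop:
--     # the remaining tail falls out uniformly, with no length comparisons.
--     xs = [x for x in a if x % 2 == 1]
--     ys = [y for y in b if y % 2 == 1]
--     out = []
--     i = j = 0
--     while i < len(xs):
--         out.append(xs[i])
--         xs, ys, i, j = ys, xs, j, i + 1
--     out.extend(ys[j:])
--     return out
-- ===== Notes on version B (the rewrite author's own statement) =====
-- stated objective: simpler
-- what changed: Replaces the index loop over range(min(n1,n2)) plus len() bookkeeping and the two tail-slicing branches by a single role-swapping recursive interleave of the two filtered lists, which handles the leftover tail uniformly.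
import Mathlib
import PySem

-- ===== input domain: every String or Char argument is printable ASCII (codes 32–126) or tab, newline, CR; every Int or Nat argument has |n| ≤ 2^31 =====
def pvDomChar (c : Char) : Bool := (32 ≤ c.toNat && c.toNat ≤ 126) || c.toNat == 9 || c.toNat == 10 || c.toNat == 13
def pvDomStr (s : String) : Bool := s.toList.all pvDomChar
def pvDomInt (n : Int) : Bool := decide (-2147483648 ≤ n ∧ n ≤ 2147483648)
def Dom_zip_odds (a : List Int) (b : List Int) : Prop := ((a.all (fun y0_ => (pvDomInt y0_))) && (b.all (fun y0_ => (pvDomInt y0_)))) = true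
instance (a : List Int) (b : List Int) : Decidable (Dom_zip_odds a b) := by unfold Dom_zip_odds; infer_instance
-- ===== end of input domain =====

-- B replaces A's min-length index loop plus two tail-slicing branches by one
-- role-swapping two-pointer interleave of the filtered lists (objective: simpler).

-- ===== PORT A =====
def is_odd (n : Int) : Bool := PySem.Int.mod n 2 == 1

def get_odds (x : List Int) : List Int :=
  x.foldl (fun ans e => if is_odd e then ans ++ [e] else ans) []

def zip_odds (a : List Int) (b : List Int) : List Int :=
  let a1 := get_odds a
  let b1 := get_odds b
  let n1 := a1.length
  let n2 := b1.length
  let new := (PySem.List.pyRange 0 (min (n1 : Int) (n2 : Int)) 1).foldl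
      (fun acc i => acc ++ [PySem.List.pyGetD a1 i 0] ++ [PySem.List.pyGetD b1 i 0]) []
  if n1 > n2 then new ++ PySem.List.slice a1 (some (n2 : Int)) none
  else if n1 < n2 then new ++ PySem.List.slice b1 (some (n1 : Int)) none
  else new

-- ===== PORT B =====
-- the 'while i < len(xs)' loop of Source B, with the xs,ys,i,j swap each iteration
def altLoop (xs : List Int) (i : Nat) (ys : List Int) (j : Nat) (out : List Int) : List Int :=
  if h : i < xs.length then
    altLoop ys j xs (i + 1) (out ++ [xs[i]])
  else out ++ ys.drop j
termination_by (xs.length - i) + (ys.length - j)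
decreasing_by omega

def zip_odds_alt (a : List Int) (b : List Int) : List Int :=
  altLoop (a.filter (fun x => PySem.Int.mod x 2 == 1)) 0
          (b.filter (fun y => PySem.Int.mod y 2 == 1)) 0 []

-- ===== PRECONDITION & SPEC =====
def Spec_zip_odds (a : List Int) (b : List Int) (out : List Int) : Prop := out = zip_odds_alt a b
instance (a : List Int) (b : List Int) (out : List Int) : Decidable (Spec_zip_odds a b out) := by unfold Spec_zip_odds; infer_instance

-- ===== CLAIM (what is proved, stated in full; the proofs are below) =====
def Claim_equal_zip_odds : Prop := ∀ (a : List Int) (b : List Int), Dom_zip_odds a b → Spec_zip_odds a b (zip_odds a b)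

-- ===== LEMMAS AND PROOFS =====

-- common reference shape: swap-recursing interleave
def ileave : List Int → List Int → List Int
  | [], ys => ys
  | x :: xs, ys => x :: ileave ys xs
termination_by xs ys => xs.length + ys.length
decreasing_by simp; omega

lemma altLoop_eq (xs : List Int) (i : Nat) (ys : List Int) (j : Nat) (out : List Int) :
    altLoop xs i ys j out = out ++ ileave (xs.drop i) (ys.drop j) := by
  fun_induction altLoop xs i ys j out with
  | case1 xs i ys j out h ih =>
    have hd : xs.drop i = xs[i] :: xs.drop (i + 1) := List.drop_eq_getElem_cons h
    rw [ih, hd, ileave, List.append_assoc]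
    rfl
  | case2 xs i ys j out h =>
    have : xs.drop i = [] := List.drop_eq_nil_of_le (by omega)
    rw [this, ileave]

lemma get_odds_eq_filter (x : List Int) :
    get_odds x = x.filter (fun e => PySem.Int.mod e 2 == 1) := by
  unfold get_odds is_odd
  rw [PySem.List.foldl_append_if_eq_filter]
  rfl

lemma ileave_core (xs : List Int) (ys : List Int) :
    ((List.range (min xs.length ys.length)).flatMap (fun k => [xs.getD k 0, ys.getD k 0])) ++
      (if ys.length < xs.length then xs.drop ys.length
       else if xs.length < ys.length then ys.drop xs.length else [])
    = ileave xs ys := by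
  induction xs generalizing ys with
  | nil =>
    cases ys with
    | nil => simp [ileave]
    | cons y ys => simp [ileave]
  | cons x xs ih =>
    cases ys with
    | nil => simp [ileave]
    | cons y ys =>
      have hmin : min (x :: xs).length (y :: ys).length = min xs.length ys.length + 1 := by
        simp [Nat.succ_min_succ]
      rw [hmin, List.range_succ_eq_map]
      simp only [List.flatMap_cons, List.flatMap_map]
      have hbody : (fun k => [(x :: xs).getD (k + 1) 0, (y :: ys).getD (k + 1) 0])
          = (fun k => [xs.getD k 0, ys.getD k 0]) := by
        funext k; simp
      simp only [Nat.succ_eq_add_one, hbody]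
      show [x, y] ++ _ ++ _ = ileave (x :: xs) (y :: ys)
      have hi : ileave (x :: xs) (y :: ys) = x :: y :: ileave xs ys := by
        rw [ileave, ileave]
      rw [hi, ← ih ys]
      simp

-- ===== VERDICT (by name: the statement is the Claim_ definition above) =====
theorem zip_odds_spec : Claim_equal_zip_odds := by
  intro a b _
  show zip_odds a b = zip_odds_alt a b
  unfold zip_odds zip_odds_alt
  rw [get_odds_eq_filter a, get_odds_eq_filter b]
  set xs := a.filter (fun e => PySem.Int.mod e 2 == 1) with hxs
  set ys := b.filter (fun e => PySem.Int.mod e 2 == 1) with hys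
  rw [altLoop_eq]
  simp only [List.drop_zero, List.nil_append]
  rw [← ileave_core xs ys]
  have hmin : (min (xs.length : Int) (ys.length : Int)) = ((min xs.length ys.length : Nat) : Int) := by
    omega
  rw [hmin, PySem.List.pyRange_one]
  have hfold : ∀ (l : List Int) (init : List Int),
      l.foldl (fun acc i => acc ++ [PySem.List.pyGetD xs i 0] ++ [PySem.List.pyGetD ys i 0]) init
        = init ++ l.flatMap (fun i => [PySem.List.pyGetD xs i 0, PySem.List.pyGetD ys i 0]) := by
    intro l init
    rw [show (fun (acc : List Int) (i : Int) => acc ++ [PySem.List.pyGetD xs i 0] ++ [PySem.List.pyGetD ys i 0])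
          = (fun acc i => acc ++ [PySem.List.pyGetD xs i 0, PySem.List.pyGetD ys i 0]) by
        funext acc i; simp]
    exact PySem.List.foldl_append_eq_flatMap _ _ _
  rw [hfold, List.flatMap_map]
  simp only [List.nil_append, zero_add]
  have hget : (fun (k : Nat) => [PySem.List.pyGetD xs (k : Int) 0,
                                 PySem.List.pyGetD ys (k : Int) 0])
      = (fun k => [xs.getD k 0, ys.getD k 0]) := by
    funext k; simp [PySem.List.pyGetD_natCast]
  have hrange : (((min xs.length ys.length : Nat) : Int) - 0).toNat = min xs.length ys.length := by
    omega
  rw [hrange, hget]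
  -- tails: slices become drops, and the if-branches line up
  rcases Nat.lt_trichotomy ys.length xs.length with h | h | h
  · rw [if_pos h, if_pos (by omega : ys.length < xs.length),
        PySem.List.slice_from_natCast]
  · rw [if_neg (by omega), if_neg (by omega), if_neg (by omega), if_neg (by omega),
        List.append_nil]
  · rw [if_neg (by omega), if_pos h, if_neg (by omega), if_pos h,
        PySem.List.slice_from_natCast]
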